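-- pv_equiv track=rewrite | github.com/fqararyah/cnn_layers | code_gen/bott_arch_seml_engine_calls_gen.py | get_layer_index_in_execution_sequence
-- ===== SOURCE A (Python) =====
-- def get_layer_index_in_execution_sequence(layers_execution_sequence, layer_index):
--     index_in_execution = 0
--     conv2d_layers_count = 0
--     if layer_index <= 0:
--         return 0
--     while conv2d_layers_count <= layer_index:
--         if 'conv2d' in layers_execution_sequence[index_in_execution]:
--             conv2d_layers_count += 1
--         index_in_execution += 1
--
--     return index_in_execution - 1
-- ===== SOURCE B (Python) =====
-- def get_layer_index_in_execution_sequence(layers_execution_sequence, layer_index):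
--     if layer_index <= 0:
--         return 0
--     conv_positions = [i for i, layer in enumerate(layers_execution_sequence)
--                       if 'conv2d' in layer]
--     return conv_positions[layer_index]
-- ===== Notes on version B (the rewrite author's own statement) =====
-- stated objective: simpler
-- what changed: Replaces the early-stopping while-loop with two mutable counters by materializing the full list of conv2d positions via enumerate and indexing it directly.
import Mathlib
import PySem

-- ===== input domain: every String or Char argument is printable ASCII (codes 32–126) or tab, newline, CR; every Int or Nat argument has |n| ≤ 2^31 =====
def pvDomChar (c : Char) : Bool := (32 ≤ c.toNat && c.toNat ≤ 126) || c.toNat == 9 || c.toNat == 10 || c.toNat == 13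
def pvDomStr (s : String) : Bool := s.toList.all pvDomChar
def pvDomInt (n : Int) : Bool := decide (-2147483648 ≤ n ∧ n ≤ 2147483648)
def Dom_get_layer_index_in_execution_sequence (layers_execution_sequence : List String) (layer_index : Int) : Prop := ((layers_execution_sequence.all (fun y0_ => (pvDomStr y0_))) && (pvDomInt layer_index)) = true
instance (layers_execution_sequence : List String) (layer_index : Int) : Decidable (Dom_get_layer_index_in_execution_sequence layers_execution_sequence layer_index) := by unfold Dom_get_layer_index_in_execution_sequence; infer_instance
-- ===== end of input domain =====

-- B changes only the algorithmic decomposition (builds the full conv2d-position table and indexes it,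
-- instead of A's early-stopping counter loop); same return value wherever A returns (both raise IndexError together).

-- ===== PORT A =====
-- the while-loop of A: rest = layers not yet visited, idx = index_in_execution, count = conv2d_layers_count.
-- On the [] branch inside 'count ≤ li' Python raises IndexError (excluded by Pre_); the port returns 0 there.
def pvLoopA (rest : List String) (idx count li : Int) : Int :=
  if count ≤ li then
    match rest with
    | [] => 0
    | l :: t => pvLoopA t (idx + 1) (if PySem.Str.isIn "conv2d" l then count + 1 else count) li
  else idx - 1

def get_layer_index_in_execution_sequence (layers_execution_sequence : List String) (layer_index : Int) : Int :=
  if layer_index ≤ 0 then 0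
  else pvLoopA layers_execution_sequence 0 0 layer_index

-- ===== PORT B =====
-- conv_positions = [i for i, layer in enumerate(seq) if 'conv2d' in layer]; return conv_positions[layer_index]
-- (pyGet? = none is Python's IndexError, excluded by Pre_; .getD 0 totalizes the port)
def get_layer_index_in_execution_sequence_alt (layers_execution_sequence : List String) (layer_index : Int) : Int :=
  if layer_index ≤ 0 then 0
  else
    let conv_positions :=
      ((PySem.List.enumerate layers_execution_sequence 0).filter
        (fun p => PySem.Str.isIn "conv2d" p.2)).map (fun p => p.1)
    (PySem.List.pyGet? conv_positions layer_index).getD 0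

-- ===== PRECONDITION & SPEC =====
-- Pre_ excludes exactly the inputs on which A (and B alike) raises IndexError:
-- layer_index ≥ 1 but the sequence contains at most layer_index layers whose name contains 'conv2d'.
def Pre_get_layer_index_in_execution_sequence (layers_execution_sequence : List String) (layer_index : Int) : Prop :=
  layer_index ≤ 0 ∨
  layer_index < (layers_execution_sequence.countP (fun l => PySem.Str.isIn "conv2d" l) : Int)
instance (layers_execution_sequence : List String) (layer_index : Int) : Decidable (Pre_get_layer_index_in_execution_sequence layers_execution_sequence layer_index) := by unfold Pre_get_layer_index_in_execution_sequence; infer_instance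

def pvWitness_get_layer_index_in_execution_sequence : List String × Int :=
  (["relu", "conv2d_1", "pool", "conv2d_2"], 1)

def Spec_get_layer_index_in_execution_sequence (layers_execution_sequence : List String) (layer_index : Int) (out : Int) : Prop := out = get_layer_index_in_execution_sequence_alt layers_execution_sequence layer_index
instance (layers_execution_sequence : List String) (layer_index : Int) (out : Int) : Decidable (Spec_get_layer_index_in_execution_sequence layers_execution_sequence layer_index out) := by unfold Spec_get_layer_index_in_execution_sequence; infer_instance

-- ===== CLAIM (what is proved, stated in full; the proofs are below) =====
def Claim_equal_get_layer_index_in_execution_sequence : Prop := ∀ (layers_execution_sequence : List String) (layer_index : Int), Dom_get_layer_index_in_execution_sequence layers_execution_sequence layer_index → Pre_get_layer_index_in_execution_sequence layers_execution_sequence layer_index → Spec_get_layer_index_in_execution_sequence layers_execution_sequence layer_index (get_layer_index_in_execution_sequence layers_execution_sequence layer_index)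

-- ===== LEMMAS AND PROOFS =====

-- B's position table, generalized over the enumerate start offset
def pvPos (s : Int) (seq : List String) : List Int :=
  ((PySem.List.enumerate seq s).filter (fun p => PySem.Str.isIn "conv2d" p.2)).map (fun p => p.1)

lemma pvPos_cons (s : Int) (l : String) (t : List String) :
    pvPos s (l :: t) =
      if PySem.Str.isIn "conv2d" l then s :: pvPos (s + 1) t else pvPos (s + 1) t := by
  simp only [pvPos, PySem.List.enumerate_cons, List.filter_cons]
  by_cases hc : PySem.Str.isIn "conv2d" l = true
  · simp only [hc, if_true, List.map_cons]
  · simp only [Bool.not_eq_true] at hc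
    simp only [hc, Bool.false_eq_true, if_false]

lemma pvPos_length (s : Int) (seq : List String) :
    (pvPos s seq).length = seq.countP (fun l => PySem.Str.isIn "conv2d" l) := by
  induction seq generalizing s with
  | nil => simp [pvPos]
  | cons l t ih =>
    rw [pvPos_cons, List.countP_cons]
    by_cases hc : PySem.Str.isIn "conv2d" l = true
    · rw [if_pos hc]
      simp only [hc, if_true, List.length_cons, ih (s + 1)]
    · rw [if_neg hc]
      simp only [Bool.not_eq_true] at hc
      simp only [hc, Bool.false_eq_true, if_false, Nat.add_zero, ih (s + 1)]

-- the loop invariant: when count ≤ li and enough conv2d layers remain,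
-- pvLoopA returns the (li-count)-th conv2d position of rest (offset by idx)
lemma pvLoopA_eq (seq : List String) :
    ∀ (s count li : Int), count ≤ li → (li - count).toNat < (pvPos s seq).length →
    pvLoopA seq s count li = (pvPos s seq).getD (li - count).toNat 0 := by
  induction seq with
  | nil =>
    intro s count li h hl
    rw [show pvPos s [] = [] from rfl] at hl
    simp at hl
  | cons l t ih =>
    intro s count li h hl
    rw [pvLoopA.eq_def]
    simp only [if_pos h]
    by_cases hc : PySem.Str.isIn "conv2d" l = true
    · rw [pvPos_cons, if_pos hc] at hl ⊢
      rw [if_pos hc]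
      by_cases he : count = li
      · subst he
        rw [pvLoopA.eq_def]
        rw [if_neg (by omega : ¬ count + 1 ≤ count)]
        have h0 : (count - count).toNat = 0 := by omega
        rw [h0, List.getD_cons_zero]
        ring
      · have h1 : count + 1 ≤ li := by omega
        have hk : (li - count).toNat = (li - (count + 1)).toNat + 1 := by omega
        rw [hk] at hl ⊢
        rw [List.getD_cons_succ]
        exact ih (s + 1) (count + 1) li h1 (by simpa using hl)
    · rw [pvPos_cons, if_neg hc] at hl ⊢
      rw [if_neg hc]
      exact ih (s + 1) count li h hl

-- ===== VERDICT (by name: the statement is the Claim_ definition above) =====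
theorem get_layer_index_in_execution_sequence_spec : Claim_equal_get_layer_index_in_execution_sequence := by
  intro seq li _ hpre
  unfold Spec_get_layer_index_in_execution_sequence
  by_cases h0 : li ≤ 0
  · simp [get_layer_index_in_execution_sequence, get_layer_index_in_execution_sequence_alt, h0]
  · have haltv : get_layer_index_in_execution_sequence_alt seq li =
        (PySem.List.pyGet? (pvPos 0 seq) li).getD 0 := by
      simp only [get_layer_index_in_execution_sequence_alt, if_neg h0]
      rfl
    have hav : get_layer_index_in_execution_sequence seq li = pvLoopA seq 0 0 li := by
      simp only [get_layer_index_in_execution_sequence, if_neg h0]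
    have hcnt : li < (seq.countP (fun l => PySem.Str.isIn "conv2d" l) : Int) := by
      rcases hpre with h | h
      · omega
      · exact h
    have hlen : li.toNat < (pvPos 0 seq).length := by
      rw [pvPos_length]; omega
    rw [hav, haltv]
    have hmain := pvLoopA_eq seq 0 0 li (by omega) (by simpa using hlen)
    simp only [Int.sub_zero] at hmain
    have hget : PySem.List.pyGet? (pvPos 0 seq) li = (pvPos 0 seq)[li.toNat]? := by
      conv_lhs => rw [show li = ((li.toNat : Nat) : Int) from by omega]
      rw [PySem.List.pyGet?_natCast]
    rw [hmain, hget, List.getD_eq_getElem?_getD]
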